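-- pv_equiv track=rewrite | github.com/madsthoisen/advent_of_code | 2019/dec12/solution.py | v_up
-- ===== SOURCE A (Python) =====
-- def v_up(v, p):
--     for i, a in enumerate(p):
--         for j in range(i + 1, 4):
--             b = p[j]
--             v[i] -= a > b
--             v[i] += a < b
--             v[j] -= b > a
--             v[j] += b < a
--     return v
-- ===== SOURCE B (Python) =====
-- def v_up(v, p):
--     for i in range(4):
--         v[i] += sum((p[j] > p[i]) - (p[j] < p[i]) for j in range(4))
--     return v
-- ===== Notes on version B (the rewrite author's own statement) =====
-- stated objective: idiomatic
-- what changed: Replaces A's triangular pairwise sweep that updates both endpoints of each pair with a per-moon accumulation that adds the full comparison-sign sum over all four moons to each v[i] independently. B's fixed range(4) outer loop also skips A's enumeration over the unused tail of p.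
-- outside the precondition, e.g. on v_up([0, 0, 0, 0], []): A returns [0, 0, 0, 0], B raises IndexError
import Mathlib
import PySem

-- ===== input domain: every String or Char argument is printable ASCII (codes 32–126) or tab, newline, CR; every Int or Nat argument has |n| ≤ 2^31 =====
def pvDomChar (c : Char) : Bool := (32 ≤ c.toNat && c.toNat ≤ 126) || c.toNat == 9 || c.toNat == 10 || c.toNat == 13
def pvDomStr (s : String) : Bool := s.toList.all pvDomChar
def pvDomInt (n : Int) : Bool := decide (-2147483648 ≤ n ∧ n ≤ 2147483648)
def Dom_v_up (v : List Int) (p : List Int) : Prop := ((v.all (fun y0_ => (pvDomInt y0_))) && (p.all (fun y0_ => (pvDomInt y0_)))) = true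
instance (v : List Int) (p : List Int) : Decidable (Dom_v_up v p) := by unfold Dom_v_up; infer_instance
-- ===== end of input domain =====

-- B replaces A's triangular pairwise sweep (each pair updates both endpoints) by an
-- independent per-moon accumulation: v[i] += Σ_j sign(p[j]-p[i]); objective: idiomatic.
-- Both A and B mutate v in place the same way; the equivalence proved is about the return value.

-- ===== PORT A =====
-- body of A's inner loop for the pair (i, j) with a = p[i], b = p[j]: the four in-place updates
def pairUpd (v : List Int) (i j a b : Int) : List Int :=
  let v := PySem.List.pySetD v i (PySem.List.pyGetD v i 0 - (if a > b then (1:Int) else 0))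
  let v := PySem.List.pySetD v i (PySem.List.pyGetD v i 0 + (if a < b then (1:Int) else 0))
  let v := PySem.List.pySetD v j (PySem.List.pyGetD v j 0 - (if b > a then (1:Int) else 0))
  PySem.List.pySetD v j (PySem.List.pyGetD v j 0 + (if b < a then (1:Int) else 0))

def v_up (v : List Int) (p : List Int) : List Int :=
  (PySem.List.enumerate p).foldl (fun v ia =>
    (PySem.List.pyRange (ia.1 + 1) 4 1).foldl (fun v j =>
      pairUpd v ia.1 j ia.2 (PySem.List.pyGetD p j 0)) v) v

-- ===== PORT B =====
def v_up_alt (v : List Int) (p : List Int) : List Int :=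
  (PySem.List.pyRange 0 4 1).foldl (fun v i =>
    PySem.List.pySetD v i (PySem.List.pyGetD v i 0 +
      ((PySem.List.pyRange 0 4 1).map (fun j =>
        (if PySem.List.pyGetD p j 0 > PySem.List.pyGetD p i 0 then (1:Int) else 0)
        - (if PySem.List.pyGetD p j 0 < PySem.List.pyGetD p i 0 then (1:Int) else 0))).sum)) v

-- ===== PRECONDITION & SPEC =====
-- Pre_ excludes p = [] (on which A's outer loop never runs and it returns v unchanged,
-- while B's fixed range(4) raises IndexError) and the inputs with 0 < len(p) < 4 or
-- len(v) < 4, on which A itself raises IndexError.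
def Pre_v_up (v : List Int) (p : List Int) : Prop := 4 ≤ v.length ∧ 4 ≤ p.length
instance (v : List Int) (p : List Int) : Decidable (Pre_v_up v p) := by unfold Pre_v_up; infer_instance
def pvWitness_v_up : List Int × List Int := ([0, 0, 0, 0], [3, 1, 2, 1])

def Spec_v_up (v : List Int) (p : List Int) (out : List Int) : Prop := out = v_up_alt v p
instance (v : List Int) (p : List Int) (out : List Int) : Decidable (Spec_v_up v p out) := by unfold Spec_v_up; infer_instance

-- ===== CLAIM (what is proved, stated in full; the proofs are below) =====
def Claim_equal_v_up : Prop := ∀ (v : List Int) (p : List Int), Dom_v_up v p → Pre_v_up v p → Spec_v_up v p (v_up v p)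

-- ===== LEMMAS AND PROOFS =====


-- evaluation of pairUpd at each literal index pair on a list with an explicit 4-prefix
theorem pairUpd01 (w0 w1 w2 w3 : Int) (r : List Int) (a b : Int) :
    pairUpd (w0::w1::w2::w3::r) 0 1 a b =
      (w0 - (if a > b then (1:Int) else 0) + (if a < b then 1 else 0)) ::
      (w1 - (if b > a then (1:Int) else 0) + (if b < a then 1 else 0)) :: w2 :: w3 :: r := by
  simp [pairUpd, pysem]
theorem pairUpd02 (w0 w1 w2 w3 : Int) (r : List Int) (a b : Int) :
    pairUpd (w0::w1::w2::w3::r) 0 2 a b =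
      (w0 - (if a > b then (1:Int) else 0) + (if a < b then 1 else 0)) :: w1 ::
      (w2 - (if b > a then (1:Int) else 0) + (if b < a then 1 else 0)) :: w3 :: r := by
  simp [pairUpd, pysem]
theorem pairUpd03 (w0 w1 w2 w3 : Int) (r : List Int) (a b : Int) :
    pairUpd (w0::w1::w2::w3::r) 0 3 a b =
      (w0 - (if a > b then (1:Int) else 0) + (if a < b then 1 else 0)) :: w1 :: w2 ::
      (w3 - (if b > a then (1:Int) else 0) + (if b < a then 1 else 0)) :: r := by
  simp [pairUpd, pysem]
theorem pairUpd12 (w0 w1 w2 w3 : Int) (r : List Int) (a b : Int) :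
    pairUpd (w0::w1::w2::w3::r) 1 2 a b =
      w0 :: (w1 - (if a > b then (1:Int) else 0) + (if a < b then 1 else 0)) ::
      (w2 - (if b > a then (1:Int) else 0) + (if b < a then 1 else 0)) :: w3 :: r := by
  simp [pairUpd, pysem]
theorem pairUpd13 (w0 w1 w2 w3 : Int) (r : List Int) (a b : Int) :
    pairUpd (w0::w1::w2::w3::r) 1 3 a b =
      w0 :: (w1 - (if a > b then (1:Int) else 0) + (if a < b then 1 else 0)) :: w2 ::
      (w3 - (if b > a then (1:Int) else 0) + (if b < a then 1 else 0)) :: r := by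
  simp [pairUpd, pysem]
theorem pairUpd23 (w0 w1 w2 w3 : Int) (r : List Int) (a b : Int) :
    pairUpd (w0::w1::w2::w3::r) 2 3 a b =
      w0 :: w1 :: (w2 - (if a > b then (1:Int) else 0) + (if a < b then 1 else 0)) ::
      (w3 - (if b > a then (1:Int) else 0) + (if b < a then 1 else 0)) :: r := by
  simp [pairUpd, pysem]

-- the tail of enumerate (indices ≥ 3) contributes nothing: the inner range is empty
theorem v_up_tail (F : List Int → Int × Int → Int → List Int) (xs : List Int) (s : Int) (hs : 3 ≤ s) (v : List Int) :
    (PySem.List.enumerate xs s).foldl (fun v ia => (PySem.List.pyRange (ia.1 + 1) 4 1).foldl (fun v j => F v ia j) v) v = v := by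
  induction xs generalizing s v with
  | nil => simp [PySem.List.enumerate_nil]
  | cons x xs ih =>
    rw [PySem.List.enumerate_cons, List.foldl_cons,
        PySem.List.pyRange_one_eq_nil (by omega : (4:Int) ≤ s + 1), List.foldl_nil]
    exact ih (s + 1) (by omega) v

-- ===== VERDICT (by name: the statement is the Claim_ definition above) =====
theorem v_up_spec : Claim_equal_v_up := by
  intro v p _ hpre
  obtain ⟨hv, hp⟩ := hpre
  obtain ⟨v0, v1, v2, v3, vr, rfl⟩ : ∃ a b c d r, v = a :: b :: c :: d :: r := by
    match v, hv with
    | a :: b :: c :: d :: r, _ => exact ⟨a, b, c, d, r, rfl⟩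
  obtain ⟨p0, p1, p2, p3, pr, rfl⟩ : ∃ a b c d r, p = a :: b :: c :: d :: r := by
    match p, hp with
    | a :: b :: c :: d :: r, _ => exact ⟨a, b, c, d, r, rfl⟩
  show v_up _ _ = v_up_alt _ _
  unfold v_up v_up_alt
  simp only [PySem.List.enumerate_cons, List.foldl_cons]
  rw [v_up_tail _ _ _ (by norm_num)]
  norm_num
  rw [show PySem.List.pyRange 0 4 1 = [0,1,2,3] from by decide,
      show PySem.List.pyRange 1 4 1 = [1,2,3] from by decide,
      show PySem.List.pyRange 2 4 1 = [2,3] from by decide,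
      show PySem.List.pyRange 3 4 1 = [3] from by decide]
  simp only [List.foldl_cons, List.foldl_nil, List.map_cons, List.map_nil, List.sum_cons, List.sum_nil]
  simp [pysem]
  rw [pairUpd01, pairUpd02, pairUpd03, pairUpd12, pairUpd13, pairUpd23]
  simp only [List.cons.injEq]
  refine ⟨?_, ?_, ?_, ?_, ?_⟩ <;> first | trivial | ring
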